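-- pv_equiv track=rewrite | github.com/alejoriosm04/university-repository | Data-structure-and-algorithms-I/workshops/seguimiento-1/simulacro-entrevista-1/dividir.py | dividir_cinco_tres
-- ===== SOURCE A (Python) =====
-- def dividir_cinco_tres(arr, length, i, cinco, tres):
--     if length == i:
--         return cinco,tres
--     elif arr[i] % 5 == 0:
--         cinco.append(arr[i])
--         return dividir_cinco_tres(arr, length, i+1, cinco, tres)
--     elif arr[i] % 3 == 0:
--         tres.append(arr[i])
--         return dividir_cinco_tres(arr, length, i+1, cinco, tres)
--     else:
--         cinco.append(arr[i]) or tres.append(arr[i])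
--         return dividir_cinco_tres(arr, length, i+1, cinco, tres)
-- ===== SOURCE B (Python) =====
-- # Same split, but in two phases: first walk the indexed segment collecting the
-- # values, then build each output with one independent filter comprehension
-- # (appended in place with +=) instead of A's four-branch per-element recursion.
-- def dividir_cinco_tres(arr, length, i, cinco, tres):
--     vals = []
--     while i != length:
--         vals.append(arr[i])
--         i += 1
--     cinco += [x for x in vals if x % 5 == 0 or x % 3 != 0]
--     tres += [x for x in vals if x % 5 != 0]
--     return cinco, tres
-- ===== Notes on version B (the rewrite author's own statement) =====
-- stated objective: simpler
-- what changed: Replaces A's per-element recursion with four branches by one pass collecting the indexed segment and two independent filter comprehensions (divisible-by-5-or-not-by-3 into cinco, not-divisible-by-5 into tres) appended in place.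
import Mathlib
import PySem

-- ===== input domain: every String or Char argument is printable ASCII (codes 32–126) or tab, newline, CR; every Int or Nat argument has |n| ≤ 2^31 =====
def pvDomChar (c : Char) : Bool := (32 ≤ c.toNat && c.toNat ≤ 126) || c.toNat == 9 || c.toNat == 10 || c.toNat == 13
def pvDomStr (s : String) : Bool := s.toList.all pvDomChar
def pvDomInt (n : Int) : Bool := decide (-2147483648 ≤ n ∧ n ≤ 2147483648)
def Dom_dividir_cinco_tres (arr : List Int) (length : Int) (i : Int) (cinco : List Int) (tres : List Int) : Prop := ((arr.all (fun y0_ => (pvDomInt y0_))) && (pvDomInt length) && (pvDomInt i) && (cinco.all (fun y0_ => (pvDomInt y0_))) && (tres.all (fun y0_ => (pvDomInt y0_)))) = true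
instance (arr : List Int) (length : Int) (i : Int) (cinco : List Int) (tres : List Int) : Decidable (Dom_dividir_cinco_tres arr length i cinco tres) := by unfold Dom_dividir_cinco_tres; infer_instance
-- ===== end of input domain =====

-- B replaces A's per-element recursion with two independent list comprehensions
-- (one filter per output list) appended to cinco/tres; objective: simpler.
-- A (and B) mutate cinco/tres in place in Python; the equivalence proved is about the return value.

-- ===== PORT A =====
-- A's recursion advances i until i == length; fuel (length - i).toNat counts the
-- remaining steps (fuel only makes the recursion structural; out-of-range index → junk, outside Pre_).
def dividirFuelA (arr : List Int) : Nat → Int → List Int → List Int → List Int × List Int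
  | 0, _, cinco, tres => (cinco, tres)
  | n+1, i, cinco, tres =>
    match PySem.List.pyGet? arr i with
    | none => (cinco, tres)   -- Python raises IndexError here; excluded by Pre_
    | some x =>
      if PySem.Int.mod x 5 == 0 then dividirFuelA arr n (i+1) (cinco ++ [x]) tres
      else if PySem.Int.mod x 3 == 0 then dividirFuelA arr n (i+1) cinco (tres ++ [x])
      else dividirFuelA arr n (i+1) (cinco ++ [x]) (tres ++ [x])

def dividir_cinco_tres (arr : List Int) (length : Int) (i : Int) (cinco : List Int) (tres : List Int) : List Int × List Int :=
  dividirFuelA arr (length - i).toNat i cinco tres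

-- ===== PORT B =====
-- B's collecting walk: while i != length, append arr[i], i += 1 (fuel counts the
-- remaining steps; out-of-range index → stop, outside Pre_ where Python raises).
def collectValsB (arr : List Int) : Nat → Int → List Int → List Int
  | 0, _, vals => vals
  | n+1, i, vals =>
    match PySem.List.pyGet? arr i with
    | none => vals
    | some x => collectValsB arr n (i+1) (vals ++ [x])

def dividir_cinco_tres_alt (arr : List Int) (length : Int) (i : Int) (cinco : List Int) (tres : List Int) : List Int × List Int :=
  let vals := collectValsB arr (length - i).toNat i []
  (cinco ++ vals.filter (fun x => PySem.Int.mod x 5 == 0 || !(PySem.Int.mod x 3 == 0)),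
   tres ++ vals.filter (fun x => !(PySem.Int.mod x 5 == 0)))

-- ===== PRECONDITION & SPEC =====
-- Pre_ excludes exactly the inputs on which A raises IndexError (or recurses past the
-- list's end when i > length): every accessed index i..length-1 must be a valid Python index.
def Pre_dividir_cinco_tres (arr : List Int) (length : Int) (i : Int) (cinco : List Int) (tres : List Int) : Prop :=
  i ≤ length ∧ (i < length → length ≤ arr.length ∧ -(arr.length : Int) ≤ i)

instance (arr : List Int) (length : Int) (i : Int) (cinco : List Int) (tres : List Int) : Decidable (Pre_dividir_cinco_tres arr length i cinco tres) := by unfold Pre_dividir_cinco_tres; infer_instance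

def pvWitness_dividir_cinco_tres : List Int × Int × Int × List Int × List Int := ([10, 9, 7, 15], 4, 0, [], [])

def Spec_dividir_cinco_tres (arr : List Int) (length : Int) (i : Int) (cinco : List Int) (tres : List Int) (out : List Int × List Int) : Prop := out = dividir_cinco_tres_alt arr length i cinco tres
instance (arr : List Int) (length : Int) (i : Int) (cinco : List Int) (tres : List Int) (out : List Int × List Int) : Decidable (Spec_dividir_cinco_tres arr length i cinco tres out) := by unfold Spec_dividir_cinco_tres; infer_instance

-- ===== CLAIM (what is proved, stated in full; the proofs are below) =====
def Claim_equal_dividir_cinco_tres : Prop := ∀ (arr : List Int) (length : Int) (i : Int) (cinco : List Int) (tres : List Int), Dom_dividir_cinco_tres arr length i cinco tres → Pre_dividir_cinco_tres arr length i cinco tres → Spec_dividir_cinco_tres arr length i cinco tres (dividir_cinco_tres arr length i cinco tres)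

-- ===== LEMMAS AND PROOFS =====

-- Main invariant: as long as every accessed index is in range, the fuel recursion of A
-- equals appending the two filters of the collected values.
lemma dividirFuelA_eq (arr : List Int) :
    ∀ (n : Nat) (i : Int) (cinco tres : List Int),
      (∀ k : Nat, k < n → (PySem.List.pyGet? arr (i + k)).isSome) →
      dividirFuelA arr n i cinco tres =
        ((cinco ++ ((List.range n).map (fun (k : Nat) => (PySem.List.pyGet? arr (i + (k : Int))).getD 0)).filter (fun x => PySem.Int.mod x 5 == 0 || !(PySem.Int.mod x 3 == 0)),
          tres ++ ((List.range n).map (fun (k : Nat) => (PySem.List.pyGet? arr (i + (k : Int))).getD 0)).filter (fun x => !(PySem.Int.mod x 5 == 0)))) := by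
  intro n
  induction n with
  | zero => intro i cinco tres _; simp [dividirFuelA]
  | succ n ih =>
    intro i cinco tres h
    have h0 : (PySem.List.pyGet? arr (i + ((0 : Nat) : Int))).isSome := h 0 (Nat.succ_pos n)
    obtain ⟨x, hx⟩ := Option.isSome_iff_exists.mp (by simpa using h0)
    have hrest : ∀ k : Nat, k < n → (PySem.List.pyGet? arr ((i + 1) + k)).isSome := by
      intro k hk
      have := h (k + 1) (by omega)
      have harg : i + ((k : Int) + 1) = (i + 1) + k := by ring
      simpa [Int.natCast_add, harg] using this
    have hrange : List.range (n + 1) = 0 :: (List.range n).map Nat.succ := List.range_succ_eq_map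
    have hmap : ((List.range n).map (fun (k : Nat) => (PySem.List.pyGet? arr (i + ((Nat.succ k : Nat) : Int))).getD 0))
        = (List.range n).map (fun (k : Nat) => (PySem.List.pyGet? arr ((i + 1) + (k : Int))).getD 0) := by
      apply List.map_congr_left; intro k _
      have harg : i + ((Nat.succ k : Nat) : Int) = (i + 1) + (k : Int) := by push_cast; ring
      rw [harg]
    simp only [dividirFuelA, hx, hrange, List.map_cons, List.map_map, Function.comp_def, hmap,
      Int.natCast_zero, add_zero, List.filter_cons]
    by_cases h5 : (5:Int) ∣ x
    · rw [if_pos (by simp [PySem.Int.mod_eq_zero_iff_dvd, h5])]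
      rw [ih (i + 1) (cinco ++ [x]) tres hrest]
      simp [hx, h5]
    · by_cases h3 : (3:Int) ∣ x
      · rw [if_neg (by simp [PySem.Int.mod_eq_zero_iff_dvd, h5]), if_pos (by simp [PySem.Int.mod_eq_zero_iff_dvd, h3])]
        rw [ih (i + 1) cinco (tres ++ [x]) hrest]
        simp [hx, h5, h3]
      · rw [if_neg (by simp [PySem.Int.mod_eq_zero_iff_dvd, h5]), if_neg (by simp [PySem.Int.mod_eq_zero_iff_dvd, h3])]
        rw [ih (i + 1) (cinco ++ [x]) (tres ++ [x]) hrest]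
        simp [hx, h5, h3]

-- B's collecting walk gathers exactly the indexed segment.
lemma collectValsB_eq (arr : List Int) :
    ∀ (n : Nat) (i : Int) (acc : List Int),
      (∀ k : Nat, k < n → (PySem.List.pyGet? arr (i + k)).isSome) →
      collectValsB arr n i acc
        = acc ++ (List.range n).map (fun (k : Nat) => (PySem.List.pyGet? arr (i + (k : Int))).getD 0) := by
  intro n
  induction n with
  | zero => intro i acc _; simp [collectValsB]
  | succ n ih =>
    intro i acc h
    have h0 : (PySem.List.pyGet? arr (i + ((0 : Nat) : Int))).isSome := h 0 (Nat.succ_pos n)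
    obtain ⟨x, hx⟩ := Option.isSome_iff_exists.mp (by simpa using h0)
    have hrest : ∀ k : Nat, k < n → (PySem.List.pyGet? arr ((i + 1) + k)).isSome := by
      intro k hk
      have := h (k + 1) (by omega)
      have harg : i + ((k : Int) + 1) = (i + 1) + k := by ring
      simpa [Int.natCast_add, harg] using this
    have hrange : List.range (n + 1) = 0 :: (List.range n).map Nat.succ := List.range_succ_eq_map
    have hmap : ((List.range n).map (fun (k : Nat) => (PySem.List.pyGet? arr (i + ((Nat.succ k : Nat) : Int))).getD 0))
        = (List.range n).map (fun (k : Nat) => (PySem.List.pyGet? arr ((i + 1) + (k : Int))).getD 0) := by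
      apply List.map_congr_left; intro k _
      have harg : i + ((Nat.succ k : Nat) : Int) = (i + 1) + (k : Int) := by push_cast; ring
      rw [harg]
    simp only [collectValsB, hx, hrange, List.map_cons, List.map_map, Function.comp_def, hmap,
      Int.natCast_zero, add_zero]
    rw [ih (i + 1) (acc ++ [x]) hrest]
    simp [hx]

-- ===== VERDICT (by name: the statement is the Claim_ definition above) =====
theorem dividir_cinco_tres_spec : Claim_equal_dividir_cinco_tres := by
  intro arr length i cinco tres _ hpre
  obtain ⟨hil, hbounds⟩ := hpre
  unfold Spec_dividir_cinco_tres dividir_cinco_tres dividir_cinco_tres_alt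
  have hsome : ∀ k : Nat, k < (length - i).toNat → (PySem.List.pyGet? arr (i + k)).isSome := by
    intro k hk
    obtain ⟨hla, hni⟩ := hbounds (by omega)
    rw [Option.isSome_iff_ne_none]
    intro hnone
    rw [PySem.List.pyGet?_eq_none_iff] at hnone
    exact hnone (by simp only [PySem.Raise.InRange]; omega)
  rw [dividirFuelA_eq arr _ i cinco tres hsome, collectValsB_eq arr _ i [] hsome]
  simp
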